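-- pv_equiv track=rewrite | github.com/MarcinKonowalczyk/psll-lang | ascii_trees.py | text2pyramid
-- ===== SOURCE A (Python) =====
-- TOP    = '^'
--
-- BOTTOM = '-'
--
-- L_SIDE = '/'
--
-- R_SIDE = '\\'
--
-- SPACE  = ' '
--
-- def text2pyramid(text,min_width=None,remove_spaces=False):
--     ''' Put text inside of a pyramid '''
--     # N = ceil(sqrt(len(text))) # Number of pyramid levels
--     if remove_spaces: text = text.replace(SPACE,'')
--     if min_width:
--         # Pad the string out such that the pyramid ends up having a correct width
--         min_width = min_width//2*2+1 # Make sure width is odd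
--         text_pad = min_width-len(text)-2 # Figure out by how much would the text have to be padded in a single line
--         text_width = ((min_width-1)//2)**2 # Desired text width
--         if text_pad > 0:
--             text = (text_pad//2)*SPACE + text + (text_pad-(text_pad//2))*SPACE
--         text = (text_width-len(text))*SPACE + text # Pad out the rest
--
--     # Ensure nice formatting of short keywords (without excessive SPACE)
--     if len(text)==2: text = SPACE + text
--     elif len(text)==3: text = SPACE + text
--     elif len(text)==5: text = 4*SPACE + text
--     elif len(text)==6: text = SPACE + text[:3] + SPACE + text[3:]
--     elif len(text)==7: text = text[:4] + SPACE + text[4:]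
--     elif len(text)==10: text = 4*SPACE + text[:5] + SPACE + text[5:]
--
--     level = 0; lines = [TOP,]
--     while text:
--         level += 1
--         i = 2*level-1
--         front, text = (text[:i],text[i:])
--         pad = i-len(front)
--         lines.append(L_SIDE + front + pad*SPACE + R_SIDE)
--     lines.append(BOTTOM*(2*level+1))
--     grid = [(level-j+1,line,level-j+1) for j,line in enumerate(lines)]
--     grid[-1] = (1,grid[-1][1],1) # Correct the padding of the final row
--     return grid
-- ===== SOURCE B (Python) =====
-- TOP    = '^'
-- BOTTOM = '-'
-- L_SIDE = '/'
-- R_SIDE = '\\'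
-- SPACE  = ' '
--
-- # (length -> (leading pad, optional split index)) for nice formatting of short keywords
-- _SPECIAL = {2: (SPACE, None), 3: (SPACE, None), 5: (4*SPACE, None),
--             6: (SPACE, 3), 7: ('', 4), 10: (4*SPACE, 5)}
--
-- def text2pyramid(text, min_width=None, remove_spaces=False):
--     ''' Put text inside of a pyramid '''
--     if remove_spaces: text = text.replace(SPACE, '')
--     if min_width:
--         min_width = min_width//2*2+1  # Make sure width is odd
--         text_pad = min_width-len(text)-2
--         text_width = ((min_width-1)//2)**2
--         if text_pad > 0:
--             text = (text_pad//2)*SPACE + text + (text_pad-(text_pad//2))*SPACE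
--         text = (text_width-len(text))*SPACE + text
--
--     sp = _SPECIAL.get(len(text))
--     if sp is not None:
--         lead, k = sp
--         text = lead + (text if k is None else text[:k] + SPACE + text[k:])
--
--     # Number of pyramid levels: least N with N*N >= len(text)
--     n = len(text)
--     N = 0
--     while N*N < n:
--         N += 1
--     text = text + (N*N - n)*SPACE  # pad once; level l holds text[(l-1)**2 : l**2]
--     lines = [TOP]
--     for l in range(1, N+1):
--         lines.append(L_SIDE + text[(l-1)*(l-1):l*l] + R_SIDE)
--     lines.append(BOTTOM*(2*N+1))
--     grid = [(N-j+1, line, N-j+1) for j, line in enumerate(lines)]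
--     grid[-1] = (1, grid[-1][1], 1)
--     return grid
-- ===== Notes on version B (the rewrite author's own statement) =====
-- stated objective: alternative
-- what changed: B replaces A's destructive while-loop that repeatedly re-slices a shrinking text (tracking level and per-line pad arithmetic) with a closed-form level count N = least N with N*N >= len(text), one up-front pad of the text to length N*N, and a direct for-loop slicing text[(l-1)**2:l**2] per line; the short-keyword if-ladder becomes a table lookup.
import Mathlib
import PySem

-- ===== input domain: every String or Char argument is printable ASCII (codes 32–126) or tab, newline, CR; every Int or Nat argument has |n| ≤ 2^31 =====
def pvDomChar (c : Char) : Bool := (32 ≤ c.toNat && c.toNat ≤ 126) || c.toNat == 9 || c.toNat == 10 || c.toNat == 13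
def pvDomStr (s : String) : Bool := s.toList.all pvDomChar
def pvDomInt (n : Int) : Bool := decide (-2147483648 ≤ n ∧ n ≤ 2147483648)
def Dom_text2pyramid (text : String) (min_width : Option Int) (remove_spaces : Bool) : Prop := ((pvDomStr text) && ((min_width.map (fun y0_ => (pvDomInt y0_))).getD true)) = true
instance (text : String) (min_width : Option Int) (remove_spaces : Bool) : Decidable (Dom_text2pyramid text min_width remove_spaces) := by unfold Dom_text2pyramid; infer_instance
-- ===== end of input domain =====

-- B replaces A's shrinking-text while-loop by a least-N-with-N*N≥len level count, one up-front pad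
-- to length N*N and direct slices text[(l-1)^2:l^2]; the short-keyword if-ladder becomes a table
-- lookup. Alternative decomposition; the return values are proved equal on Dom.


-- ===== PORT A =====

-- n*SPACE : a negative repeat count gives '' in Python, as toNat's clamp does here (exact)
def pvSpaces (n : Int) : List Char := List.replicate n.toNat ' '

-- the 'if remove_spaces / if min_width' preprocessing; these lines are verbatim the same in Source A and Source B
def pvPrepA (text : String) (min_width : Option Int) (remove_spaces : Bool) : List Char :=
  let t := text.toList
  let t := if remove_spaces then PySem.Chars.replace t [' '] [] else t
  match min_width with
  | none => t
  | some m =>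
    if m ≠ 0 then  -- Python truthiness of the int min_width
      let mw := PySem.Int.floordiv m 2 * 2 + 1
      let text_pad := mw - (t.length : Int) - 2
      let text_width := (PySem.Int.floordiv (mw - 1) 2) ^ 2
      let t := if text_pad > 0 then
          pvSpaces (PySem.Int.floordiv text_pad 2) ++ t ++ pvSpaces (text_pad - PySem.Int.floordiv text_pad 2)
        else t
      pvSpaces (text_width - (t.length : Int)) ++ t
    else t

-- the if/elif ladder for short keywords; slices text[:k]/text[k:] with a literal k ≥ 0 are take/drop (exact)
def pvLadderA (t : List Char) : List Char :=
  if t.length = 2 then ' ' :: t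
  else if t.length = 3 then ' ' :: t
  else if t.length = 5 then pvSpaces 4 ++ t
  else if t.length = 6 then ' ' :: (t.take 3 ++ ' ' :: t.drop 3)
  else if t.length = 7 then t.take 4 ++ ' ' :: t.drop 4
  else if t.length = 10 then pvSpaces 4 ++ (t.take 5 ++ ' ' :: t.drop 5)
  else t

-- 'while text:' — level is 0,1,2,… in Python, carried as a Nat; i = 2*(level+1)-1 is the incremented
-- level's 2*level-1, so i ≥ 1 and the remaining text strictly shrinks
def pvLoopA (chars : List Char) (level : Nat) (lines : List (List Char)) : Nat × List (List Char) :=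
  if chars = [] then (level, lines)
  else
    let i : Nat := 2 * (level + 1) - 1
    let front := chars.take i
    let pad := i - front.length
    pvLoopA (chars.drop i) (level + 1) (lines ++ ['/' :: (front ++ List.replicate pad ' ' ++ ['\\'])])
termination_by chars.length
decreasing_by
  rename_i h
  have : chars.length ≠ 0 := by simpa using h
  simp only [List.length_drop]; omega

-- the bottom row, grid comprehension and grid[-1] correction; verbatim the same lines in Source A and Source B
def pvTailA (level : Nat) (lines : List (List Char)) : List (Int × String × Int) :=
  let lines := lines ++ [List.replicate (2 * level + 1) '-']
  let grid := (PySem.List.enumerate lines 0).map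
    (fun jl => ((level : Int) - jl.1 + 1, String.ofList jl.2, (level : Int) - jl.1 + 1))
  -- grid[-1] = (1, grid[-1][1], 1): grid is never empty (lines starts with TOP)
  grid.dropLast ++ (match grid.getLast? with | some g => [(1, g.2.1, 1)] | none => [])

def text2pyramid (text : String) (min_width : Option Int) (remove_spaces : Bool) : List (Int × String × Int) :=
  let t := pvLadderA (pvPrepA text min_width remove_spaces)
  let r := pvLoopA t 0 [['^']]
  pvTailA r.1 r.2

-- ===== PORT B =====

-- Source B's identical preprocessing lines
def pvPrepB (text : String) (min_width : Option Int) (remove_spaces : Bool) : List Char :=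
  let t := text.toList
  let t := if remove_spaces then PySem.Chars.replace t [' '] [] else t
  match min_width with
  | none => t
  | some m =>
    if m ≠ 0 then
      let mw := PySem.Int.floordiv m 2 * 2 + 1
      let text_pad := mw - (t.length : Int) - 2
      let text_width := (PySem.Int.floordiv (mw - 1) 2) ^ 2
      let t := if text_pad > 0 then
          pvSpaces (PySem.Int.floordiv text_pad 2) ++ t ++ pvSpaces (text_pad - PySem.Int.floordiv text_pad 2)
        else t
      pvSpaces (text_width - (t.length : Int)) ++ t
    else t

-- Source B's _SPECIAL table: length ↦ (leading pad, optional split index)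
def pvSpecialB : PySem.Dict Int (List Char × Option Int) :=
  PySem.Dict.ofList [(2, ([' '], none)), (3, ([' '], none)), (5, (List.replicate 4 ' ', none)),
                     (6, ([' '], some 3)), (7, ([], some 4)), (10, (List.replicate 4 ' ', some 5))]

-- 'sp = _SPECIAL.get(len(text)); if sp is not None: …'; text[:k]/text[k:] with table k ≥ 0 are take/drop (exact)
def pvApplySpecialB (t : List Char) : List Char :=
  match pvSpecialB.get? (t.length : Int) with
  | none => t
  | some (lead, k) =>
    lead ++ (match k with
             | none => t
             | some kk => t.take kk.toNat ++ [' '] ++ t.drop kk.toNat)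

-- 'N = 0; while N*N < n: N += 1'
def pvFindN (n N : Nat) : Nat :=
  if N * N < n then pvFindN n (N + 1) else N
termination_by n - N * N
decreasing_by
  rename_i h
  have h2 : N * N < (N + 1) * (N + 1) := by nlinarith
  omega

def pvTailB (level : Nat) (lines : List (List Char)) : List (Int × String × Int) :=
  let lines := lines ++ [List.replicate (2 * level + 1) '-']
  let grid := (PySem.List.enumerate lines 0).map
    (fun jl => ((level : Int) - jl.1 + 1, String.ofList jl.2, (level : Int) - jl.1 + 1))
  grid.dropLast ++ (match grid.getLast? with | some g => [(1, g.2.1, 1)] | none => [])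

def text2pyramid_alt (text : String) (min_width : Option Int) (remove_spaces : Bool) : List (Int × String × Int) :=
  let t := pvApplySpecialB (pvPrepB text min_width remove_spaces)
  let n := t.length
  let N := pvFindN n 0
  let padded := t ++ List.replicate (N * N - n) ' '  -- text += (N*N-n)*SPACE, and N*N ≥ n
  let lines := (PySem.List.pyRange 1 ((N : Int) + 1) 1).foldl
    (fun acc l => acc ++ ['/' :: (PySem.List.slice padded (some ((l - 1) * (l - 1))) (some (l * l)) ++ ['\\'])])
    [['^']]
  pvTailB N lines

-- ===== PRECONDITION & SPEC =====
def Spec_text2pyramid (text : String) (min_width : Option Int) (remove_spaces : Bool) (out : List (Int × String × Int)) : Prop := out = text2pyramid_alt text min_width remove_spaces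
instance (text : String) (min_width : Option Int) (remove_spaces : Bool) (out : List (Int × String × Int)) : Decidable (Spec_text2pyramid text min_width remove_spaces out) := by unfold Spec_text2pyramid; infer_instance

-- ===== CLAIM (what is proved, stated in full; the proofs are below) =====
def Claim_equal_text2pyramid : Prop := ∀ (text : String) (min_width : Option Int) (remove_spaces : Bool), Dom_text2pyramid text min_width remove_spaces → Spec_text2pyramid text min_width remove_spaces (text2pyramid text min_width remove_spaces)

-- ===== LEMMAS AND PROOFS =====

theorem pvPrep_eq : pvPrepA = pvPrepB := rfl

theorem pvTail_eq : pvTailA = pvTailB := rfl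

-- A's if/elif ladder and B's table lookup agree, by cases on the length
theorem pvLadder_eq (t : List Char) : pvLadderA t = pvApplySpecialB t := by
  unfold pvLadderA pvApplySpecialB
  by_cases h2 : t.length = 2
  · have : ((t.length : Int)) = 2 := by exact_mod_cast h2
    rw [this]; simp [h2, show pvSpecialB.get? 2 = some ([' '], none) from by decide]
  by_cases h3 : t.length = 3
  · have : ((t.length : Int)) = 3 := by exact_mod_cast h3
    rw [this]; simp [h3, show pvSpecialB.get? 3 = some ([' '], none) from by decide]
  by_cases h5 : t.length = 5
  · have : ((t.length : Int)) = 5 := by exact_mod_cast h5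
    rw [this]
    simp [h5, show pvSpecialB.get? 5 = some (List.replicate 4 ' ', none) from by decide, pvSpaces]
  by_cases h6 : t.length = 6
  · have : ((t.length : Int)) = 6 := by exact_mod_cast h6
    rw [this]; simp [h6, show pvSpecialB.get? 6 = some ([' '], some 3) from by decide]
  by_cases h7 : t.length = 7
  · have : ((t.length : Int)) = 7 := by exact_mod_cast h7
    rw [this]; simp [h7, show pvSpecialB.get? 7 = some ([], some 4) from by decide]
  by_cases h10 : t.length = 10
  · have : ((t.length : Int)) = 10 := by exact_mod_cast h10
    rw [this]
    simp [h10,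
          show pvSpecialB.get? 10 = some (List.replicate 4 ' ', some 5) from by decide, pvSpaces]
  · have hz : pvSpecialB.get? (t.length : Int) = none := by
      rw [PySem.Dict.get?_eq_none_iff_not_mem_keys]
      have hk : pvSpecialB.keys = [2, 3, 5, 6, 7, 10] := by decide
      simp only [hk, List.mem_cons, List.not_mem_nil, or_false]
      push Not
      refine ⟨by exact_mod_cast h2, by exact_mod_cast h3, by exact_mod_cast h5,
              by exact_mod_cast h6, by exact_mod_cast h7, by exact_mod_cast h10⟩
    simp [h2, h3, h5, h6, h7, h10, hz]

-- B's while loop computes the least N ≥ start with N*N ≥ n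
theorem pvFindN_ge (n N : Nat) : n ≤ pvFindN n N * pvFindN n N := by
  fun_induction pvFindN with
  | case1 N h ih => exact ih
  | case2 N h => omega

theorem pvFindN_lt (n N k : Nat) (hN : N ≤ k) (hk : k < pvFindN n N) : k * k < n := by
  fun_induction pvFindN with
  | case1 N h ih =>
    rcases Nat.eq_or_lt_of_le hN with rfl | h'
    · exact h
    · exact ih h' hk
  | case2 N h => omega

-- a slice of the space-padded text is the unpadded slice plus the missing spaces
theorem pad_slice (c : List Char) (x : Char) (m s k : Nat) (h : s + k ≤ c.length + m) :
    ((c ++ List.replicate m x).drop s).take k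
    = (c.drop s).take k ++ List.replicate (k - ((c.drop s).take k).length) x := by
  rw [List.drop_append, List.drop_replicate, List.take_append, List.take_replicate]
  congr 1
  simp [List.length_take, List.length_drop]
  omega

-- invariant run of A's loop: after lv levels the remaining text is c.drop (lv*lv), and the
-- remaining iterations produce exactly the slices of the padded text at levels lv+1 … N
theorem pvLoop_inv (c : List Char) (N : Nat) (hge : c.length ≤ N * N)
    (hlt : ∀ k, k < N → k * k < c.length) :
    ∀ lv acc, lv < N →
    pvLoopA (c.drop (lv * lv)) lv acc
    = (N, acc ++ (List.range' (lv + 1) (N - lv)).map (fun l =>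
        '/' :: (((c ++ List.replicate (N * N - c.length) ' ').drop ((l - 1) * (l - 1))).take (2 * l - 1) ++ ['\\']))) := by
  intro lv acc hlv
  induction hd : N - lv generalizing lv acc with
  | zero => omega
  | succ d ih =>
    have hne : c.drop (lv * lv) ≠ [] := by
      have := hlt lv hlv
      simp only [ne_eq, List.drop_eq_nil_iff]
      omega
    rw [pvLoopA, if_neg hne]
    have hdrop : (c.drop (lv * lv)).drop (2 * (lv + 1) - 1) = c.drop ((lv + 1) * (lv + 1)) := by
      rw [List.drop_drop]; congr 1; ring_nf; omega
    have hline : (c.drop (lv * lv)).take (2 * (lv + 1) - 1)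
        ++ List.replicate ((2 * (lv + 1) - 1) - ((c.drop (lv * lv)).take (2 * (lv + 1) - 1)).length) ' '
        = ((c ++ List.replicate (N * N - c.length) ' ').drop (((lv + 1) - 1) * ((lv + 1) - 1))).take (2 * (lv + 1) - 1) := by
      have hsimp : ((lv + 1) - 1) * ((lv + 1) - 1) = lv * lv := by simp
      rw [hsimp, pad_slice]
      have h1 : lv + 1 ≤ N := hlv
      have h2 : (lv + 1) * (lv + 1) ≤ N * N := Nat.mul_le_mul h1 h1
      have h3 : lv * lv + (2 * lv + 1) = (lv + 1) * (lv + 1) := by ring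
      omega
    simp only [hdrop]
    rcases Nat.lt_or_ge (lv + 1) N with hlt2 | hge2
    · rw [ih (lv + 1) _ hlt2 (by omega)]
      rw [List.range'_succ]
      simp only [List.map_cons, List.append_assoc, List.cons_append, List.nil_append, ← hline]
    · -- lv + 1 = N : the remaining text is exhausted and the loop stops
      have hN : lv + 1 = N := by omega
      have hnil : c.drop ((lv + 1) * (lv + 1)) = [] := by
        rw [List.drop_eq_nil_iff]
        calc c.length ≤ N * N := hge
        _ ≤ (lv + 1) * (lv + 1) := by rw [hN]
      rw [hnil, pvLoopA, if_pos rfl]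
      have hd0 : d = 0 := by omega
      subst hd0
      subst hN
      have hr1 : List.range' (lv + 1) (0 + 1) = [lv + 1] := rfl
      rw [hr1]
      simp only [List.map_cons, List.map_nil]
      rw [hline]

-- B's range-and-slice loop produces the same line list, written over List.range'
theorem pvLinesB_eq (padded : List Char) (N : Nat) :
    (PySem.List.pyRange 1 ((N : Int) + 1) 1).foldl
      (fun acc l => acc ++ ['/' :: (PySem.List.slice padded (some ((l - 1) * (l - 1))) (some (l * l)) ++ ['\\'])])
      [['^']]
    = [['^']] ++ (List.range' 1 N).map (fun l =>
        '/' :: ((padded.drop ((l - 1) * (l - 1))).take (2 * l - 1) ++ ['\\'])) := by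
  rw [PySem.List.foldl_append_singleton_eq_map]
  congr 1
  rw [PySem.List.pyRange_one, List.map_map, List.range'_eq_map_range, List.map_map]
  have hN : (((N : Int) + 1) - 1).toNat = N := by simp
  rw [hN]
  congr 1
  funext k
  simp only [Function.comp_apply]
  have e1 : ((1 : Int) + (k : Int) - 1) * ((1 : Int) + (k : Int) - 1) = ((k * k : Nat) : Int) := by
    push_cast; ring
  have e2 : ((1 : Int) + (k : Int)) * ((1 : Int) + (k : Int)) = (((k + 1) * (k + 1) : Nat) : Int) := by
    push_cast; ring
  rw [e1, e2, PySem.List.slice_natCast]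
  have e3 : (k + 1) * (k + 1) - k * k = 2 * (1 + k) - 1 := by
    have h : (k + 1) * (k + 1) = k * k + 2 * k + 1 := by ring
    omega
  have e4 : (1 + k - 1) * (1 + k - 1) = k * k := by simp
  rw [e3, e4]

-- the whole pyramid-building part agrees, for any preprocessed text t
theorem pvCore_eq (t : List Char) :
    pvTailA (pvLoopA t 0 [['^']]).1 (pvLoopA t 0 [['^']]).2
    = pvTailB (pvFindN t.length 0)
        ((PySem.List.pyRange 1 ((pvFindN t.length 0 : Int) + 1) 1).foldl
          (fun acc l => acc ++ ['/' ::
            (PySem.List.slice (t ++ List.replicate (pvFindN t.length 0 * pvFindN t.length 0 - t.length) ' ')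
              (some ((l - 1) * (l - 1))) (some (l * l)) ++ ['\\'])])
          [['^']]) := by
  rw [pvLinesB_eq, ← pvTail_eq]
  by_cases h0 : t = []
  · subst h0
    have hL : pvLoopA [] 0 [['^']] = (0, [['^']]) := by rw [pvLoopA]; simp
    have hF : pvFindN ([] : List Char).length 0 = 0 := by rw [pvFindN]; simp
    rw [hL, hF]
    simp
  · have hn : 0 < t.length := List.length_pos_iff.mpr h0
    have hge := pvFindN_ge t.length 0
    have hN0 : 0 < pvFindN t.length 0 := by
      rcases Nat.eq_zero_or_pos (pvFindN t.length 0) with hF0 | h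
      · rw [hF0] at hge; omega
      · exact h
    have hrun := pvLoop_inv t (pvFindN t.length 0) hge
      (fun k hk => pvFindN_lt t.length 0 k (Nat.zero_le k) hk) 0 [['^']] hN0
    simp only [Nat.zero_mul, Nat.zero_add, Nat.sub_zero, List.drop_zero] at hrun
    rw [hrun]

-- ===== VERDICT (by name: the statement is the Claim_ definition above) =====
theorem text2pyramid_spec : Claim_equal_text2pyramid := by
  intro text min_width remove_spaces _
  unfold Spec_text2pyramid text2pyramid text2pyramid_alt
  rw [pvPrep_eq, pvLadder_eq]
  exact pvCore_eq (pvApplySpecialB (pvPrepB text min_width remove_spaces))
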